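-- pv_equiv track=rewrite | github.com/lanlan47879/adventofcode2020 | day06/day06_part01.py | get_yes_count
-- ===== SOURCE A (Python) =====
-- import string
--
-- def get_yes_count(entries):
--     count = 0
--     alphabet = list(string.ascii_lowercase)
--
--     for letter in alphabet:
--         for entry in entries:
--             if letter in entry:
--                 count += 1
--
--     return count
-- ===== SOURCE B (Python) =====
-- import string
--
-- def get_yes_count(entries):
--     return sum(len({c for c in entry if c in string.ascii_lowercase})
--                for entry in entries)
-- ===== Notes on version B (the rewrite author's own statement) =====
-- stated objective: faster
-- what changed: Instead of 26 alphabet-driven substring scans over all entries, B makes one pass: for each entry it builds the set of its characters that are lowercase letters via a set comprehension and sums the set sizes.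
import Mathlib
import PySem

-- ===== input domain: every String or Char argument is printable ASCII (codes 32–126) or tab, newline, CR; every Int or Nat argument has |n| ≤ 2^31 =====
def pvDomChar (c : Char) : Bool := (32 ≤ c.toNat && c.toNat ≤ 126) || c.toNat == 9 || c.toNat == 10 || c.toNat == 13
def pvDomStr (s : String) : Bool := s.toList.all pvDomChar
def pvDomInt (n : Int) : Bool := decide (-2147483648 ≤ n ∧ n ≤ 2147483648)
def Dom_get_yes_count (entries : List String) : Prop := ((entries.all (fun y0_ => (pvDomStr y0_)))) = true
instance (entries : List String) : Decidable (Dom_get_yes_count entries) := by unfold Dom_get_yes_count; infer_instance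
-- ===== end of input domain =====

-- B replaces A's 26 alphabet-driven substring scans by one pass over the entries,
-- summing the size of each entry's set of lowercase-letter characters.

-- string.ascii_lowercase (shared module constant)
def asciiLowercase : List Char :=
  ['a','b','c','d','e','f','g','h','i','j','k','l','m',
   'n','o','p','q','r','s','t','u','v','w','x','y','z']

-- ===== PORT A =====
-- 'letter in entry' with a single-character letter is exactly character membership in the string.
def get_yes_count (entries : List String) : Int :=
  asciiLowercase.foldl
    (fun count letter =>
      entries.foldl (fun count entry => if entry.toList.contains letter then count + 1 else count) count)
    0

-- ===== PORT B =====
-- {c for c in entry if c in string.ascii_lowercase} = Set.ofList of the filtered character list;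
-- sum(... for entry in entries) = sum of the mapped list.
def get_yes_count_alt (entries : List String) : Int :=
  (entries.map (fun entry =>
      PySem.Set.len (PySem.Set.ofList (entry.toList.filter (fun c => asciiLowercase.contains c))))).sum

-- ===== PRECONDITION & SPEC =====
def Spec_get_yes_count (entries : List String) (out : Int) : Prop := out = get_yes_count_alt entries
instance (entries : List String) (out : Int) : Decidable (Spec_get_yes_count entries out) := by unfold Spec_get_yes_count; infer_instance

-- ===== CLAIM (what is proved, stated in full; the proofs are below) =====
def Claim_equal_get_yes_count : Prop := ∀ (entries : List String), Dom_get_yes_count entries → Spec_get_yes_count entries (get_yes_count entries)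

-- ===== LEMMAS AND PROOFS =====

-- per-entry counting: the number of alphabet letters occurring in the entry equals the
-- size of the set of the entry's characters that are lowercase letters
lemma per_entry (entry : String) :
    (asciiLowercase.countP (fun l => entry.toList.contains l) : Int)
      = PySem.Set.len (PySem.Set.ofList (entry.toList.filter (fun c => asciiLowercase.contains c))) := by
  have hperm :
      (asciiLowercase.filter (fun l => entry.toList.contains l)).Perm
        (PySem.Set.ofList (entry.toList.filter (fun c => asciiLowercase.contains c))) := by
    rw [List.perm_ext_iff_of_nodup
      (List.Nodup.filter _ (by decide))
      (PySem.Set.nodup_ofList _)]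
    intro a
    simp [List.mem_filter, PySem.Set.mem_ofList, And.comm]
  have hlen := hperm.length_eq
  simp only [PySem.Set.len, List.countP_eq_length_filter]
  omega

-- A's double loop, summed entry-by-entry
lemma swap_sum (entries : List String) :
    (asciiLowercase.map (fun l => (entries.countP (fun e => e.toList.contains l) : Int))).sum
      = (entries.map (fun e => (asciiLowercase.countP (fun l => e.toList.contains l) : Int))).sum := by
  induction entries with
  | nil => simp
  | cons e es ih =>
      have h1 :
          (asciiLowercase.map (fun l => ((e :: es).countP (fun e' => e'.toList.contains l) : Int))).sum
            = (asciiLowercase.map (fun l =>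
                (if e.toList.contains l then (1 : Int) else 0)
                  + (es.countP (fun e' => e'.toList.contains l) : Int))).sum := by
        apply congrArg
        apply List.map_congr_left
        intro l _
        rw [List.countP_cons]
        split_ifs with h <;> push_cast <;> ring
      rw [h1, PySem.List.sum_map_add_int, PySem.List.sum_map_ite_one_zero, ih,
        List.map_cons, List.sum_cons]

theorem get_yes_count_eq (entries : List String) :
    get_yes_count entries = get_yes_count_alt entries := by
  have hA : get_yes_count entries
      = (asciiLowercase.map (fun l => (entries.countP (fun e => e.toList.contains l) : Int))).sum := by
    unfold get_yes_count
    rw [PySem.List.foldl_congr_mem _ _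
      (fun count letter => count + (entries.countP (fun e => e.toList.contains letter) : Int)) 0
      (fun acc x _ => PySem.List.foldl_if_add_one _ _ _)]
    rw [PySem.List.foldl_add]
    simp
  rw [hA, swap_sum]
  unfold get_yes_count_alt
  apply congrArg
  apply List.map_congr_left
  intro e _
  exact per_entry e

-- ===== VERDICT (by name: the statement is the Claim_ definition above) =====
theorem get_yes_count_spec : Claim_equal_get_yes_count := by
  intro entries _
  unfold Spec_get_yes_count
  exact get_yes_count_eq entries
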